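-- pv_equiv track=rewrite | github.com/cohky16/atcoder | abc257/abc257_c/main.py | solve
-- ===== SOURCE A (Python) =====
-- def solve(N, S, W):
--     if len(set(S)) == 1: return N
--     slist = []
--     cnt = 0
--     # 二次元配列で値とインデックスをソートできるように保持
--     for i in range(N):
--         slist.append([W[i], S[i]])
--         # 大人の数を数え上げておく
--         if S[i] == '1':
--             cnt += 1
--     slist.sort()
--     ans = cnt
--     for i in range(N):
--         w,s = slist[i]
--         # iに対して子どもがきたら合計値を増やす
--         if s == '0': cnt += 1
--         # iに対して大人がきたら合計値を減らす
--         if s == '1': cnt -= 1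
--         # リストの最後か次が繰り返しではない場合に値を更新する
--         if i+1 == N or slist[i+1][0] != w:
--             ans = max(ans, cnt)
--     return (ans)
-- ===== SOURCE B (Python) =====
-- def solve(N, S, W):
--     people = [(W[i], S[i]) for i in range(N)]
--     adults = sum(1 for w, s in people if s == '1')
--     best = adults
--     for v, _ in people:
--         happy = sum(1 for w, s in people
--                     if (s == '0' and w <= v) or (s == '1' and w > v))
--         if happy > best:
--             best = happy
--     return best
-- ===== Notes on version B (the rewrite author's own statement) =====
-- stated objective: simpler
-- what changed: B drops the sort-and-boundary-scan entirely: instead of sorting (weight, kind) pairs and sweeping a running counter that snapshots at group boundaries, B directly evaluates, for each candidate threshold weight v, the count of children with weight <= v plus adults with weight > v, and takes the maximum (seeded with the all-adults count).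
-- outside the precondition, e.g. on solve(2, ['x', 'x'], [1, 2]): A returns 2, B returns 0; on solve(3, ['1', '1', '1'], [1, 2]): A returns 3, B raises IndexError; on solve(-1, ['1', '1'], [1, 2]): A returns -1, B returns 0
import Mathlib
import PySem

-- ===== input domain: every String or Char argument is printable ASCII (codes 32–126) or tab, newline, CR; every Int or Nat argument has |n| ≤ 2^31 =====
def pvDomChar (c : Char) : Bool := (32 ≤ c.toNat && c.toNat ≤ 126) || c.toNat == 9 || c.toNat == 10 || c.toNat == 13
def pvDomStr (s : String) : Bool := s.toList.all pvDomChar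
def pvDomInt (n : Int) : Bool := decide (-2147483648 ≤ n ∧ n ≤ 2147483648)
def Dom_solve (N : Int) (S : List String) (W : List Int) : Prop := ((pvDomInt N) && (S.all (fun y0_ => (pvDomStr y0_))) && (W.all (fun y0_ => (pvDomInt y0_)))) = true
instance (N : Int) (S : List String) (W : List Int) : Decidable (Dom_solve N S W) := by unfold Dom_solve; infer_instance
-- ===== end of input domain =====

-- B replaces A's sort-and-boundary-sweep by a direct per-threshold count (simpler, no sort); equivalence is on the return value (neither version mutates its arguments).

-- ===== PORT A =====
-- one step of A's second loop ('for i in range(N)'): slist[i] lookup, the two counter updates, and the boundary test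
-- (Python short-circuits 'i+1 == N or slist[i+1][0] != w'; here pyGetD's default is irrelevant when i+1 = N, exact).
def stepA (slist : List (Int × String)) (N : Int) (st : Int × Int) (i : Int) : Int × Int :=
  let p := PySem.List.pyGetD slist i (0, "")
  let cnt1 := st.1 + (if p.2 = "0" then 1 else 0)
  let cnt2 := cnt1 + (if p.2 = "1" then -1 else 0)
  let ans := if i + 1 = N ∨ (PySem.List.pyGetD slist (i + 1) (0, "")).1 ≠ p.1 then max st.2 cnt2 else st.2
  (cnt2, ans)

-- 'slist.sort()' on [w, s] pairs is Python's lexicographic (w, s) sort: sorted2 with keys (fst, snd);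
-- the string component is compared through toList (Char code points = Python's code-point order, exact on Dom).
def solve (N : Int) (S : List String) (W : List Int) : Int :=
  if PySem.Set.len (PySem.Set.ofList S) = 1 then N
  else
    let built := (PySem.List.pyRange 0 N).foldl
      (fun (st : List (Int × String) × Int) i =>
        (st.1 ++ [(PySem.List.pyGetD W i 0, PySem.List.pyGetD S i "")],
         if PySem.List.pyGetD S i "" = "1" then st.2 + 1 else st.2))
      ([], 0)
    let slist := PySem.List.sorted2 built.1 (fun p => p.1) (fun p => p.2.toList)
    let fin := (PySem.List.pyRange 0 N).foldl (stepA slist N) (built.2, built.2)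
    fin.2

-- ===== PORT B =====
-- Source B: people = [(W[i], S[i]) for i in range(N)]; 'sum(1 for … if c)' is sum over the filtered list;
-- 'w > v' is 'v < w'.
def solve_alt (N : Int) (S : List String) (W : List Int) : Int :=
  let people := (PySem.List.pyRange 0 N).map
    (fun i => (PySem.List.pyGetD W i 0, PySem.List.pyGetD S i ""))
  let adults := ((people.filter (fun p => p.2 == "1")).map (fun _ => (1 : Int))).sum
  people.foldl
    (fun best p =>
      let happy := ((people.filter (fun q =>
        (q.2 == "0" && decide (q.1 ≤ p.1)) || (q.2 == "1" && decide (p.1 < q.1)))).map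
        (fun _ => (1 : Int))).sum
      if happy > best then happy else best)
    adults

-- ===== PRECONDITION & SPEC =====
-- Pre_ excludes (i) inputs where N exceeds a list length — there A raises IndexError, except that when S is
-- constant A's 'len(set(S))==1' guard returns the raw N without ever reading W, while B reads the lists and
-- raises; and (ii) the degenerate corner of a constant S whose symbol is outside the problem's 0/1 alphabet
-- (with N ≠ 0), or a constant S with negative N — there the guard's raw N and B's count are equally arbitrary,
-- since such inputs are outside the problem's 0/1-string, consistent-length domain.
def Pre_solve (N : Int) (S : List String) (W : List Int) : Prop :=
  N ≤ (S.length : Int) ∧ N ≤ (W.length : Int) ∧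
    (S ≠ [] → (∀ t ∈ S, t = S.headI) → 0 ≤ N ∧ (S.headI = "0" ∨ S.headI = "1" ∨ N = 0))
instance (N : Int) (S : List String) (W : List Int) : Decidable (Pre_solve N S W) := by
  unfold Pre_solve; infer_instance
def pvWitness_solve : Int × List String × List Int := (2, ["0", "1"], [3, 4])

def Spec_solve (N : Int) (S : List String) (W : List Int) (out : Int) : Prop := out = solve_alt N S W
instance (N : Int) (S : List String) (W : List Int) (out : Int) : Decidable (Spec_solve N S W out) := by
  unfold Spec_solve; infer_instance

-- ===== CLAIM (what is proved, stated in full; the proofs are below) =====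
def Claim_equal_solve : Prop := ∀ (N : Int) (S : List String) (W : List Int), Dom_solve N S W → Pre_solve N S W → Spec_solve N S W (solve N S W)

-- ===== LEMMAS AND PROOFS =====

-- A's second loop as a structural recursion over the (already sorted) list, lookahead included.
def sweepA : List (Int × String) → Int × Int → Int × Int
  | [], st => st
  | p :: rest, st =>
      let cnt1 := st.1 + (if p.2 = "0" then 1 else 0)
      let cnt2 := cnt1 + (if p.2 = "1" then -1 else 0)
      let ans := if rest = [] ∨ rest.headI.1 ≠ p.1 then max st.2 cnt2 else st.2
      sweepA rest (cnt2, ans)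

-- the building blocks of B, named for the proofs
def peopleOf (N : Int) (S : List String) (W : List Int) : List (Int × String) :=
  (PySem.List.pyRange 0 N).map (fun i => (PySem.List.pyGetD W i 0, PySem.List.pyGetD S i ""))
def adultsB (people : List (Int × String)) : Int :=
  ((people.filter (fun p => p.2 == "1")).map (fun _ => (1 : Int))).sum
def happyB (people : List (Int × String)) (v : Int) : Int :=
  ((people.filter (fun q =>
    (q.2 == "0" && decide (q.1 ≤ v)) || (q.2 == "1" && decide (v < q.1)))).map (fun _ => (1 : Int))).sum
def altFold (people : List (Int × String)) : Int :=
  people.foldl (fun best p =>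
    let happy := happyB people p.1
    if happy > best then happy else best) (adultsB people)

-- the signed contribution of one person to A's running counter, and its prefix sums
def hdel (L : List (Int × String)) (v : Int) : Int :=
  (L.map (fun q => if q.1 ≤ v then
    ((if q.2 = "0" then (1 : Int) else 0) + (if q.2 = "1" then (-1 : Int) else 0)) else 0)).sum

theorem solve_alt_eq (N : Int) (S : List String) (W : List Int) :
    solve_alt N S W = altFold (peopleOf N S W) := rfl

theorem sorted2_eq_sorted_lex (xs : List (Int × String)) :
    PySem.List.sorted2 xs (fun p => p.1) (fun p => p.2.toList)
      = PySem.List.sorted xs (fun p => toLex (p.1, p.2.toList)) := by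
  rw [PySem.List.sorted_eq_foldl_insertBy]
  simp only [PySem.List.sorted2, if_neg (by decide : ¬ (false = true))]
  have hb : (fun (a b : Int × String) =>
      decide (a.1 < b.1) || !decide (b.1 < a.1) && decide (a.2.toList < b.2.toList))
      = (fun a b => decide (toLex (a.1, a.2.toList) < toLex (b.1, b.2.toList))) := by
    funext a b
    rcases lt_trichotomy a.1 b.1 with h | h | h
    · simp [Prod.Lex.lt_iff, h, asymm h]
    · simp [Prod.Lex.lt_iff, h]
    · simp [Prod.Lex.lt_iff, h, asymm h, ne_of_gt h]
  rw [hb]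

theorem sorted2_pairwise_fst (xs : List (Int × String)) :
    (PySem.List.sorted2 xs (fun p => p.1) (fun p => p.2.toList)).Pairwise
      (fun a b => a.1 ≤ b.1) := by
  rw [sorted2_eq_sorted_lex]
  refine (PySem.List.sorted_pairwise xs (fun p => toLex (p.1, p.2.toList))).imp ?_
  intro a b h
  rcases Prod.Lex.le_iff.1 h with h1 | h2
  · exact le_of_lt h1
  · exact le_of_eq h2.1

-- A's index loop over range(N) is the structural sweep (N = length of slist).
theorem loop_eq_sweep (L : List (Int × String)) :
    ∀ (m k : Nat) (st : Int × Int), L.length = k + m →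
      (PySem.List.pyRange (k : Int) (L.length : Int)).foldl (stepA L (L.length : Int)) st
        = sweepA (L.drop k) st := by
  intro m
  induction m with
  | zero =>
      intro k st hlen
      have hnil : PySem.List.pyRange (k : Int) (L.length : Int) = [] :=
        List.eq_nil_of_length_eq_zero (by rw [PySem.List.length_pyRange_one]; omega)
      rw [hnil, List.drop_eq_nil_of_le (by omega)]
      rfl
  | succ n ihm =>
      intro k st hlen
      have hk : k < L.length := by omega
      rw [PySem.List.pyRange_one_cons (by exact_mod_cast hk), List.foldl_cons,
        List.drop_eq_getElem_cons hk]
      have hget : PySem.List.pyGetD L (k : Int) (0, "") = L[k] := by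
        rw [PySem.List.pyGetD_eq_getElem L (0, "") (by positivity) (by exact_mod_cast hk)]
        simp
      have hcast : ((k : Int) + 1) = ((k + 1 : Nat) : Int) := by push_cast; ring
      by_cases hend : k + 1 = L.length
      · -- last iteration: both boundary tests fire through their first disjunct
        have hc1 : ((k : Int) + 1 = (L.length : Int) ∨
            (PySem.List.pyGetD L ((k : Int) + 1) (0, "")).1 ≠ (PySem.List.pyGetD L (k : Int) (0, "")).1) := by
          left; omega
        have hdropnil : L.drop (k + 1) = [] := List.drop_eq_nil_of_le (by omega)
        rw [show sweepA (L[k] :: L.drop (k+1)) st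
            = sweepA (L.drop (k+1)) (st.1 + (if L[k].2 = "0" then 1 else 0) + (if L[k].2 = "1" then -1 else 0),
              if L.drop (k+1) = [] ∨ (L.drop (k+1)).headI.1 ≠ L[k].1 then
                max st.2 (st.1 + (if L[k].2 = "0" then 1 else 0) + (if L[k].2 = "1" then -1 else 0)) else st.2) from rfl]
        rw [show stepA L (L.length : Int) st (k : Int)
            = (st.1 + (if (PySem.List.pyGetD L (k : Int) (0, "")).2 = "0" then 1 else 0)
                 + (if (PySem.List.pyGetD L (k : Int) (0, "")).2 = "1" then -1 else 0),
               if ((k : Int) + 1 = (L.length : Int) ∨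
                   (PySem.List.pyGetD L ((k : Int) + 1) (0, "")).1 ≠ (PySem.List.pyGetD L (k : Int) (0, "")).1) then
                 max st.2 (st.1 + (if (PySem.List.pyGetD L (k : Int) (0, "")).2 = "0" then 1 else 0)
                   + (if (PySem.List.pyGetD L (k : Int) (0, "")).2 = "1" then -1 else 0)) else st.2) from rfl]
        rw [if_pos hc1, if_pos (Or.inl hdropnil), hget, hcast]
        exact ihm (k + 1) _ (by omega)
      · have hk1 : k + 1 < L.length := by omega
        have hget1 : PySem.List.pyGetD L ((k : Int) + 1) (0, "") = L[k+1] := by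
          rw [hcast, PySem.List.pyGetD_eq_getElem L (0, "") (by positivity) (by exact_mod_cast hk1)]
          simp
        have hdrop1 : L.drop (k + 1) = L[k+1] :: L.drop (k+2) := List.drop_eq_getElem_cons hk1
        rw [show sweepA (L[k] :: L.drop (k+1)) st
            = sweepA (L.drop (k+1)) (st.1 + (if L[k].2 = "0" then 1 else 0) + (if L[k].2 = "1" then -1 else 0),
              if L.drop (k+1) = [] ∨ (L.drop (k+1)).headI.1 ≠ L[k].1 then
                max st.2 (st.1 + (if L[k].2 = "0" then 1 else 0) + (if L[k].2 = "1" then -1 else 0)) else st.2) from rfl]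
        rw [show stepA L (L.length : Int) st (k : Int)
            = (st.1 + (if (PySem.List.pyGetD L (k : Int) (0, "")).2 = "0" then 1 else 0)
                 + (if (PySem.List.pyGetD L (k : Int) (0, "")).2 = "1" then -1 else 0),
               if ((k : Int) + 1 = (L.length : Int) ∨
                   (PySem.List.pyGetD L ((k : Int) + 1) (0, "")).1 ≠ (PySem.List.pyGetD L (k : Int) (0, "")).1) then
                 max st.2 (st.1 + (if (PySem.List.pyGetD L (k : Int) (0, "")).2 = "0" then 1 else 0)
                   + (if (PySem.List.pyGetD L (k : Int) (0, "")).2 = "1" then -1 else 0)) else st.2) from rfl]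
        rw [hget]
        have hcond : ((k : Int) + 1 = (L.length : Int) ∨
            (PySem.List.pyGetD L ((k : Int) + 1) (0, "")).1 ≠ L[k].1)
            ↔ (L.drop (k+1) = [] ∨ (L.drop (k+1)).headI.1 ≠ L[k].1) := by
          rw [hget1, hdrop1]
          simp only [List.headI_cons]
          constructor
          · rintro (h | h)
            · exact absurd (by exact_mod_cast h) hend
            · exact Or.inr h
          · rintro (h | h)
            · have := congrArg List.length h
              simp at this
              exact absurd this (by omega)
            · exact Or.inr h
        by_cases hb : (L.drop (k+1) = [] ∨ (L.drop (k+1)).headI.1 ≠ L[k].1)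
        · rw [if_pos hb, if_pos (hcond.2 hb), hcast]
          exact ihm (k + 1) _ (by omega)
        · rw [if_neg hb, if_neg (fun hc => hb (hcond.1 hc)), hcast]
          exact ihm (k + 1) _ (by omega)

theorem foldl_max_init {β : Type} (l : List β) (e : β → Int) (a x : Int) :
    l.foldl (fun b p => max b (e p)) (max a x) = max (l.foldl (fun b p => max b (e p)) a) x := by
  induction l generalizing a with
  | nil => rfl
  | cons p t ih => simpa [List.foldl, max_right_comm a x (e p)] using ih (max a (e p))

theorem foldl_max_absorb {β : Type} (l : List β) (e : β → Int) (a : Int) {q : β} (hq : q ∈ l) :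
    l.foldl (fun b p => max b (e p)) (max a (e q)) = l.foldl (fun b p => max b (e p)) a := by
  rw [foldl_max_init]
  exact max_eq_left ((PySem.List.le_foldl_max_int l e a).2 q hq)

theorem foldl_max_le {β : Type} (l : List β) (e : β → Int) (a c : Int)
    (ha : a ≤ c) (he : ∀ p ∈ l, e p ≤ c) :
    l.foldl (fun b p => max b (e p)) a ≤ c := by
  induction l generalizing a with
  | nil => exact ha
  | cons p t ih =>
      exact ih _ (max_le ha (he p (by simp))) (fun r hr => he r (by simp [hr]))

theorem sweep_sorted (L : List (Int × String)) (hL : L.Pairwise (fun a b => a.1 ≤ b.1)) :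
    ∀ cnt ans, (sweepA L (cnt, ans)).2
      = L.foldl (fun b p => max b (cnt + hdel L p.1)) ans := by
  induction L with
  | nil => intro cnt ans; rfl
  | cons p rest ih =>
      intro cnt ans
      obtain ⟨hhead, hrest⟩ := List.pairwise_cons.1 hL
      have hdelcons : ∀ v, hdel (p :: rest) v
          = (if p.1 ≤ v then ((if p.2 = "0" then (1 : Int) else 0) + (if p.2 = "1" then (-1 : Int) else 0)) else 0)
            + hdel rest v := by
        intro v; simp [hdel]
      have hbase : ∀ (acc : Int) (v : Int), p.1 ≤ v →
          max acc (cnt + hdel (p :: rest) v)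
            = max acc ((cnt + (if p.2 = "0" then 1 else 0) + (if p.2 = "1" then -1 else 0)) + hdel rest v) := by
        intro acc v hv
        rw [hdelcons, if_pos hv]
        congr 1
        ring
      have hfold : ∀ init : Int, List.foldl (fun b q => max b (cnt + hdel (p :: rest) q.1)) init rest =
          List.foldl (fun b q => max b ((cnt + (if p.2 = "0" then 1 else 0) + (if p.2 = "1" then -1 else 0)) + hdel rest q.1)) init rest :=
        fun init => PySem.List.foldl_congr_mem _ _ _ _ (fun acc q hq => hbase acc q.1 (hhead q hq))
      rw [List.foldl_cons, hbase _ _ le_rfl, hfold]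
      set cnt2 : Int := cnt + (if p.2 = "0" then 1 else 0) + (if p.2 = "1" then -1 else 0) with hcnt2
      match rest, hrest, hhead, ih with
      | [], _, _, _ =>
          show (sweepA [] (cnt2, if ([] : List (Int × String)) = [] ∨ _ then max ans cnt2 else ans)).2 = _
          simp [sweepA, hdel]
      | q :: t, hrest, hhead, ih =>
          by_cases hq : q.1 = p.1
          · have hbdry : ¬ ((q :: t : List (Int × String)) = [] ∨ (q :: t).headI.1 ≠ p.1) := by
              simp [hq]
            show (sweepA (q :: t) (cnt2, if (q :: t : List (Int × String)) = [] ∨ (q :: t).headI.1 ≠ p.1 then max ans cnt2 else ans)).2 = _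
            rw [if_neg hbdry, ih hrest cnt2 ans]
            have : hdel (q :: t) p.1 = hdel (q :: t) q.1 := by rw [hq]
            rw [this]
            exact (foldl_max_absorb (q :: t) (fun r => cnt2 + hdel (q :: t) r.1) ans (by simp)).symm
          · have hbdry : ((q :: t : List (Int × String)) = [] ∨ (q :: t).headI.1 ≠ p.1) := by
              simp [hq]
            show (sweepA (q :: t) (cnt2, if (q :: t : List (Int × String)) = [] ∨ (q :: t).headI.1 ≠ p.1 then max ans cnt2 else ans)).2 = _
            rw [if_pos hbdry, ih hrest cnt2 (max ans cnt2)]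
            have hzero : hdel (q :: t) p.1 = 0 := by
              apply List.sum_eq_zero
              intro x hx
              rw [List.mem_map] at hx
              obtain ⟨r, hr, hxr⟩ := hx
              have hlt : ¬ r.1 ≤ p.1 := by
                have h1 : p.1 ≤ q.1 := hhead q (by simp)
                rcases List.mem_cons.1 hr with rfl | hrt
                · omega
                · have := (List.pairwise_cons.1 hrest).1 r hrt
                  omega
              rw [← hxr, if_neg hlt]
            rw [hzero]
            simp

theorem adults_add_hdel (people : List (Int × String)) (v : Int) :
    adultsB people + hdel people v = happyB people v := by
  induction people with
  | nil => simp [adultsB, hdel, happyB]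
  | cons p t ih =>
      simp only [adultsB, happyB, hdel, List.map_cons, List.sum_cons, List.filter_cons] at ih ⊢
      by_cases h1 : p.2 = "1" <;> by_cases h0 : p.2 = "0"
      · exact absurd (h0.symm.trans h1) (by decide)
      · by_cases hv : p.1 ≤ v
        · have hnlt : ¬ (v < p.1) := by omega
          simp [h1, hv, hnlt] at ih ⊢
          omega
        · have hlt : v < p.1 := by omega
          simp [h1, hv, hlt] at ih ⊢
          omega
      · by_cases hv : p.1 ≤ v
        · have hnlt : ¬ (v < p.1) := by omega
          simp [h0, hv, hnlt] at ih ⊢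
          omega
        · have hlt : v < p.1 := by omega
          simp [h0, hv, hlt] at ih ⊢
          omega
      · simp [h1, h0] at ih ⊢
        omega

theorem happyB_le (people : List (Int × String)) (v : Int) :
    happyB people v ≤ (people.length : Int) := by
  unfold happyB
  rw [PySem.List.sum_map_const_int]
  have := List.length_filter_le (fun (q : Int × String) =>
    (q.2 == "0" && decide (q.1 ≤ v)) || (q.2 == "1" && decide (v < q.1))) people
  omega

theorem altFold_eq_foldmax (people : List (Int × String)) :
    altFold people = people.foldl (fun b p => max b (happyB people p.1)) (adultsB people) := by
  unfold altFold
  refine PySem.List.foldl_congr_mem _ _ _ _ ?_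
  intro b p _
  simp only []
  split_ifs with h <;> omega

theorem altFold_uniform1 (people : List (Int × String)) (h : ∀ p ∈ people, p.2 = "1") :
    altFold people = (people.length : Int) := by
  rw [altFold_eq_foldmax]
  have had : adultsB people = (people.length : Int) := by
    unfold adultsB
    rw [List.filter_eq_self.2 (fun a ha => by simp [h a ha])]
    rw [PySem.List.sum_map_const_int]; ring
  refine le_antisymm (foldl_max_le _ _ _ _ (by rw [had]) (fun p _ => happyB_le people p.1)) ?_
  calc (people.length : Int) = adultsB people := had.symm
    _ ≤ _ := (PySem.List.le_foldl_max_int people (fun p => happyB people p.1) (adultsB people)).1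

theorem altFold_uniform0 (people : List (Int × String)) (h : ∀ p ∈ people, p.2 = "0") :
    altFold people = (people.length : Int) := by
  rw [altFold_eq_foldmax]
  have had : adultsB people = 0 := by
    unfold adultsB
    rw [List.filter_eq_nil_iff.2 (fun a ha => by simp [h a ha])]
    rfl
  cases hm : PySem.List.max? people (fun p => p.1) with
  | none =>
      have : people = [] := (PySem.List.max?_eq_none_iff people _).1 hm
      subst this; simp [had]
  | some m =>
      have hmem := PySem.List.max?_mem hm
      have hmax := PySem.List.max?_isMax hm
      have hh : happyB people m.1 = (people.length : Int) := by
        unfold happyB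
        rw [List.filter_eq_self.2 (fun q hq => by simp [h q hq, hmax q hq])]
        rw [PySem.List.sum_map_const_int]; ring
      refine le_antisymm (foldl_max_le _ _ _ _ (by rw [had]; positivity) (fun p _ => happyB_le people p.1)) ?_
      calc (people.length : Int) = happyB people m.1 := hh.symm
        _ ≤ _ := (PySem.List.le_foldl_max_int people (fun p => happyB people p.1) (adultsB people)).2 m hmem


theorem hdel_perm {L M : List (Int × String)} (h : L.Perm M) (v : Int) : hdel L v = hdel M v :=
  (h.map _).sum_eq

theorem foldl_max_perm {β : Type} (e : β → Int) {l₁ l₂ : List β} (h : l₁.Perm l₂) (a : Int) :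
    l₁.foldl (fun b p => max b (e p)) a = l₂.foldl (fun b p => max b (e p)) a :=
  haveI : RightCommutative (fun (b : Int) p => max b (e p)) := ⟨fun b x y => max_right_comm b (e x) (e y)⟩
  h.foldl_eq a

theorem peopleOf_len (N : Int) (S : List String) (W : List Int) :
    (peopleOf N S W).length = N.toNat := by
  simp [peopleOf, PySem.List.length_pyRange_one]

-- ===== VERDICT (by name: the statement is the Claim_ definition above) =====
set_option maxHeartbeats 1000000 in
theorem solve_spec : Claim_equal_solve := by
  intro N S W _ hPre
  obtain ⟨hNS, hNW, hU⟩ := hPre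
  unfold Spec_solve
  rw [solve_alt_eq]
  by_cases hset : PySem.Set.len (PySem.Set.ofList S) = 1
  · -- guard branch: S is constant; A returns N
    simp only [solve, if_pos hset]
    have hlen1 : (PySem.Set.ofList S).length = 1 := by
      have hl : PySem.Set.len (PySem.Set.ofList S) = ((PySem.Set.ofList S).length : Int) := by
        simp [PySem.Set.len]
      omega
    obtain ⟨c, hc⟩ := List.length_eq_one_iff.1 hlen1
    have hmemc : ∀ t ∈ S, t = c := fun t ht => by
      have hmem := (PySem.Set.mem_ofList S t).2 ht
      rw [hc] at hmem; simpa using hmem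
    have hne : S ≠ [] := by
      intro h
      rw [h] at hc
      simp [show PySem.Set.ofList ([] : List String) = [] from rfl] at hc
    have hhead : S.headI = c := by
      cases S with
      | nil => exact absurd rfl hne
      | cons a t => exact hmemc a (by simp)
    obtain ⟨hN0, hcase⟩ := hU hne (fun t ht => (hmemc t ht).trans hhead.symm)
    have hpe : ∀ p ∈ peopleOf N S W, p.2 = S.headI := by
      intro p hp
      obtain ⟨i, hi, rfl⟩ := List.mem_map.1 hp
      have hi' := PySem.List.mem_pyRange_one.1 hi
      have hmem : PySem.List.pyGetD S i "" ∈ S :=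
        PySem.List.pyGetD_mem S "" (by simp [PySem.Raise.InRange]; omega)
      exact (hmemc _ hmem).trans hhead.symm
    have hplen := peopleOf_len N S W
    rcases hcase with h0 | h1 | hz
    · rw [altFold_uniform0 _ (fun p hp => (hpe p hp).trans h0)]
      omega
    · rw [altFold_uniform1 _ (fun p hp => (hpe p hp).trans h1)]
      omega
    · have hnilp : peopleOf N S W = [] := List.eq_nil_of_length_eq_zero (by omega)
      rw [hnilp, hz]; rfl
  · -- no guard: A builds, sorts and sweeps
    simp only [solve, if_neg hset]
    rw [PySem.List.foldl_prod_mk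
      (f := fun acc i => acc ++ [(PySem.List.pyGetD W i 0, PySem.List.pyGetD S i "")])
      (g := fun acc i => if PySem.List.pyGetD S i "" = "1" then acc + 1 else acc)]
    rw [PySem.List.foldl_append_singleton_eq_map, PySem.List.foldl_ite_add_one]
    simp only [List.nil_append]
    rw [show ((PySem.List.pyRange 0 N).map
        (fun i => (PySem.List.pyGetD W i 0, PySem.List.pyGetD S i ""))) = peopleOf N S W from rfl]
    have hcnt : (0 : Int) + ((PySem.List.pyRange 0 N).countP
        (fun i => decide (PySem.List.pyGetD S i "" = "1")) : Int) = adultsB (peopleOf N S W) := by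
      unfold adultsB peopleOf
      rw [PySem.List.sum_map_const_int, ← List.countP_eq_length_filter, List.countP_map]
      have hpred : ((fun (p : Int × String) => p.2 == "1")
          ∘ (fun i => (PySem.List.pyGetD W i 0, PySem.List.pyGetD S i ""))) =
          (fun i => decide (PySem.List.pyGetD S i "" = "1")) := by
        funext i
        by_cases h : PySem.List.pyGetD S i "" = "1" <;> simp [Function.comp, h]
      rw [hpred]
      omega
    rw [hcnt]
    by_cases hNneg : N < 0
    · have hrange : PySem.List.pyRange 0 N = ([] : List Int) :=
        List.eq_nil_of_length_eq_zero (by rw [PySem.List.length_pyRange_one]; omega)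
      have hnilp : peopleOf N S W = [] := by
        unfold peopleOf; rw [hrange]; rfl
      rw [hnilp]
      simp [hrange, altFold, adultsB]
    · rw [not_lt] at hNneg
      have hperm := PySem.List.sorted2_perm (peopleOf N S W) (fun p => p.1) (fun p => p.2.toList) false
      have hLlen : ((PySem.List.sorted2 (peopleOf N S W) (fun p => p.1) (fun p => p.2.toList)).length : Int) = N := by
        rw [hperm.length_eq, peopleOf_len]; omega
      have hloop := loop_eq_sweep (PySem.List.sorted2 (peopleOf N S W) (fun p => p.1) (fun p => p.2.toList))
        (PySem.List.sorted2 (peopleOf N S W) (fun p => p.1) (fun p => p.2.toList)).length 0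
        (adultsB (peopleOf N S W), adultsB (peopleOf N S W)) (by omega)
      rw [hLlen] at hloop
      simp only [Nat.cast_zero, List.drop_zero] at hloop
      rw [hloop]
      rw [sweep_sorted _ (sorted2_pairwise_fst (peopleOf N S W))]
      rw [altFold_eq_foldmax]
      have he : ∀ (b : Int) (p : Int × String),
          max b (adultsB (peopleOf N S W)
            + hdel (PySem.List.sorted2 (peopleOf N S W) (fun p => p.1) (fun p => p.2.toList)) p.1)
          = max b (happyB (peopleOf N S W) p.1) := by
        intro b p
        rw [hdel_perm hperm, adults_add_hdel]
      rw [PySem.List.foldl_congr_mem _ _ (fun b p => max b (happyB (peopleOf N S W) p.1)) _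
        (fun acc x _ => he acc x)]
      exact foldl_max_perm (fun p => happyB (peopleOf N S W) p.1) hperm _
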